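-- pv_equiv track=rewrite | github.com/ethanqtle/ethan_cs50 | CS50P/pset2/plates/plates.py | alphaThenDigit
-- ===== SOURCE A (Python) =====
-- def alphaThenDigit(s):
--     alphaCount = 0
--     digitCount = 0
--     searchAlpha = True
--     for c in s:
--         if searchAlpha:
--             if c.isalpha():
--                 alphaCount += 1
--             else:
--                 if c == "0":
--                     return False
--                 searchAlpha = False
--         else:
--             if not c.isdigit():
--                 return False
--             else:
--                 digitCount += 1
--     return True
-- ===== SOURCE B (Python) =====
-- def alphaThenDigit(s):
--     i = 0
--     while i < len(s) and s[i].isalpha():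
--         i += 1
--     rest = s[i:]
--     return rest == "" or (rest[0] != "0" and rest.isdigit())
-- ===== Notes on version B (the rewrite author's own statement) =====
-- stated objective: simpler
-- what changed: Replaces A's stateful single scan (boolean phase flag plus unused counters) with a phase-split decomposition: compute the leading alphabetic run, then classify the whole remainder in one expression.
-- intended difference: On strings whose first non-alphabetic character is a non-digit followed only by digits (e.g. 'AB!12', '+5'), A returns True because it never digit-checks the phase-transition character, while B returns False, the intended answer for a letters-then-digits plate validator. — e.g. on alphaThenDigit("AB!12"): A returns true, B returns false
import Mathlib
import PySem

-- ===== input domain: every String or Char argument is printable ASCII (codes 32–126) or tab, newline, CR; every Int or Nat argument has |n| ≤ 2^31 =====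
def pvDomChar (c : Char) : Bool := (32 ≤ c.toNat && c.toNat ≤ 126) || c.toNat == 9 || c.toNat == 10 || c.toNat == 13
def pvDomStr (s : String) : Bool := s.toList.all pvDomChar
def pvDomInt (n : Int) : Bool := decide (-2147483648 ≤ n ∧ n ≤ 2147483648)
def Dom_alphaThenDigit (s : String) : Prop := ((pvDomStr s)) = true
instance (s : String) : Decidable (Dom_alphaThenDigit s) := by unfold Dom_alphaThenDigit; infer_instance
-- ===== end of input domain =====

-- B: phase-split decomposition (leading alphabetic run, then classify the remainder); it validates the
-- whole numeric part, so it differs from A exactly where A's unchecked transition character hides (see D_).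

-- ===== PORT A =====
-- A's loop: state = (alphaCount, digitCount, searchAlpha); early 'return False' becomes returning false.
def aLoop : List Char → Int → Int → Bool → Bool
  | [], _, _, _ => true
  | c :: cs, alphaCount, digitCount, searchAlpha =>
    if searchAlpha then
      if PySem.Chars.isalpha c then aLoop cs (alphaCount + 1) digitCount searchAlpha
      else if c = '0' then false
      else aLoop cs alphaCount digitCount false
    else
      if ¬ (PySem.Chars.isdigit c) then false
      else aLoop cs alphaCount (digitCount + 1) searchAlpha

def alphaThenDigit (s : String) : Bool := aLoop s.toList 0 0 true

-- ===== PORT B =====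
-- B's while loop computing i, the length of the leading alphabetic run.
def bRun : List Char → Nat
  | [] => 0
  | c :: cs => if PySem.Chars.isalpha c then bRun cs + 1 else 0

def alphaThenDigit_alt (s : String) : Bool :=
  let l := s.toList
  let rest := l.drop (bRun l)
  -- rest == "" or (rest[0] != "0" and rest.isdigit())
  match rest with
  | [] => true
  | r :: rs => (r ≠ '0') && (r :: rs).all PySem.Chars.isdigit

-- ===== PRECONDITION & SPEC =====
-- On strings whose first non-alphabetic character is a non-digit followed only by digits (e.g. "AB!12", "+5"),
-- A returns True because it never digit-checks the phase-transition character; B returns False, the intended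
-- answer for an alpha-then-digit plate validator.
def D_alphaThenDigit (s : String) : Prop :=
  ((s.toList.dropWhile PySem.Chars.isalpha).head?.any (fun c => !PySem.Chars.isdigit c)) = true
  ∧ ((s.toList.dropWhile PySem.Chars.isalpha).tail.all PySem.Chars.isdigit) = true
instance (s : String) : Decidable (D_alphaThenDigit s) := by unfold D_alphaThenDigit; infer_instance

def Spec_alphaThenDigit (s : String) (out : Bool) : Prop := ¬ D_alphaThenDigit s → out = alphaThenDigit_alt s
instance (s : String) (out : Bool) : Decidable (Spec_alphaThenDigit s out) := by unfold Spec_alphaThenDigit; infer_instance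

def pvDiffWitness_alphaThenDigit : String := "AB!12"
def pvDiffWitnessOut_alphaThenDigit : Bool × Bool := (true, false)

-- ===== CLAIM =====
def Claim_unchanged_alphaThenDigit : Prop := ∀ (s : String), Dom_alphaThenDigit s → Spec_alphaThenDigit s (alphaThenDigit s)
def Claim_changed_alphaThenDigit : Prop := Dom_alphaThenDigit (pvDiffWitness_alphaThenDigit) ∧ D_alphaThenDigit (pvDiffWitness_alphaThenDigit) ∧ alphaThenDigit (pvDiffWitness_alphaThenDigit) = pvDiffWitnessOut_alphaThenDigit.1 ∧ alphaThenDigit_alt (pvDiffWitness_alphaThenDigit) = pvDiffWitnessOut_alphaThenDigit.2 ∧ pvDiffWitnessOut_alphaThenDigit.1 ≠ pvDiffWitnessOut_alphaThenDigit.2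
def Claim_exact_alphaThenDigit : Prop := ∀ (s : String), Dom_alphaThenDigit s → D_alphaThenDigit s → alphaThenDigit s ≠ alphaThenDigit_alt s

-- ===== LEMMAS AND PROOFS =====

-- B's run-length slice equals dropWhile isalpha.
theorem drop_bRun (l : List Char) :
    l.drop (bRun l) = l.dropWhile PySem.Chars.isalpha := by
  induction l with
  | nil => rfl
  | cons c cs ih =>
    by_cases h : PySem.Chars.isalpha c = true <;> simp [bRun, List.dropWhile, h, ih]

-- In the digit phase A is exactly an all-isdigit check.
theorem aLoop_false (l : List Char) (a d : Int) :
    aLoop l a d false = l.all PySem.Chars.isdigit := by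
  induction l generalizing a d with
  | nil => rfl
  | cons c cs ih =>
    simp only [aLoop, List.all_cons]
    by_cases h : PySem.Chars.isdigit c = true <;> simp [h, ih]

-- A's alpha-phase loop, characterised via dropWhile.
theorem aLoop_true (l : List Char) (a d : Int) :
    aLoop l a d true =
      (match l.dropWhile PySem.Chars.isalpha with
       | [] => true
       | r :: rs => if r = '0' then false else rs.all PySem.Chars.isdigit) := by
  induction l generalizing a d with
  | nil => rfl
  | cons c cs ih =>
    by_cases h : PySem.Chars.isalpha c = true
    · simpa [aLoop, List.dropWhile, h] using ih (a + 1) d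
    · by_cases h0 : c = '0'
      · subst h0
        have hz : PySem.Chars.isalpha '0' = false := by decide
        simp [aLoop, List.dropWhile, hz]
      · simp [aLoop, List.dropWhile, h, h0, aLoop_false]

theorem alphaThenDigit_spec : Claim_unchanged_alphaThenDigit := by
  intro s _ hD
  simp only [alphaThenDigit, alphaThenDigit_alt, aLoop_true, drop_bRun]
  unfold D_alphaThenDigit at hD
  cases hr : s.toList.dropWhile PySem.Chars.isalpha with
  | nil => rfl
  | cons r rs =>
    simp only [hr, Option.any_some, List.head?_cons, List.tail_cons] at hD ⊢
    by_cases hd : PySem.Chars.isdigit r = true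
    · by_cases h0 : r = '0'
      · subst h0; simp
      · simp [h0, hd]
    · have hrs : rs.all PySem.Chars.isdigit = false := by
        by_contra h
        exact hD ⟨by simp [hd], by simpa using h⟩
      have h0 : r ≠ '0' := by
        intro h; subst h; exact hd (by decide)
      simp [h0, hd, hrs]

theorem alphaThenDigit_changed : Claim_changed_alphaThenDigit := by
  unfold Claim_changed_alphaThenDigit; decide

theorem alphaThenDigit_tight : Claim_exact_alphaThenDigit := by
  intro s _ hD
  unfold D_alphaThenDigit at hD
  simp only [alphaThenDigit, alphaThenDigit_alt, aLoop_true, drop_bRun]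
  cases hr : s.toList.dropWhile PySem.Chars.isalpha with
  | nil => simp [hr] at hD
  | cons r rs =>
    simp only [hr, Option.any_some, List.head?_cons, List.tail_cons] at hD
    obtain ⟨hd, hrs⟩ := hD
    have hd' : PySem.Chars.isdigit r = false := by simpa using hd
    have h0 : r ≠ '0' := by
      intro h; subst h; simp [show PySem.Chars.isdigit '0' = true by decide] at hd'
    simp [h0, hd', hrs]
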